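-- pv_equiv track=rewrite | github.com/Hiepnt03/Python_codePtit | PY01025.py | add_phay
-- ===== SOURCE A (Python) =====
-- def add_phay(s) :
--     tmp = 0
--     result = ""
--     for i in range(len(s)-1,-1,-1) :
--         if tmp == 3 :
--             result += ','
--             tmp = 0
--         result += s[i]
--         tmp += 1
--     return result
-- ===== SOURCE B (Python) =====
-- def add_phay(s):
--     rev = s[::-1]
--     chunks = []
--     while rev:
--         chunks.append(rev[:3])
--         rev = rev[3:]
--     return ','.join(chunks)
-- ===== Notes on version B (the rewrite author's own statement) =====
-- stated objective: alternative
-- what changed: Replaces the character-by-character loop with a modular comma counter by reversing the string once and chunking it into slices of length 3 joined with commas.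
import Mathlib
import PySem

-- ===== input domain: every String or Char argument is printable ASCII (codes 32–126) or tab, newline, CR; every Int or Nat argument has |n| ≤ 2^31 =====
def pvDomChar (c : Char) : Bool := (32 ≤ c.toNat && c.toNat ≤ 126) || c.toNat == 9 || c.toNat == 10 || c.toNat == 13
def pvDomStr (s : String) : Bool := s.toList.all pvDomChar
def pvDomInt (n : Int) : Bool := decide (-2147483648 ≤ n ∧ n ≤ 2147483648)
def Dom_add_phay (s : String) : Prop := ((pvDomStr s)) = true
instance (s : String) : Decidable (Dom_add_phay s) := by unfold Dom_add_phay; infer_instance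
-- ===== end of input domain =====

-- B re-implements A by a different decomposition: reverse once, then chunk into slices of 3 joined with commas (alternative shape, not faster).

-- ===== PORT A =====
-- literal port of A: countdown index loop with a modular counter 'tmp';
-- the index i from range(len(s)-1,-1,-1) is always in range, so '(pyGet? cs i).getD' is exact (never hits the default).
def add_phay (s : String) : String :=
  let cs := s.toList
  let st := (PySem.List.pyRange ((cs.length : Int) - 1) (-1) (-1)).foldl
    (fun (st : Int × List Char) i =>
      let tmp := st.1
      let result := st.2
      let result := if tmp == 3 then result ++ [','] else result
      let tmp := if tmp == 3 then (0 : Int) else tmp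
      (tmp + 1, result ++ [(PySem.List.pyGet? cs i).getD ' ']))
    ((0 : Int), ([] : List Char))
  String.ofList st.2

-- ===== PORT B =====
-- the 'while rev: chunks.append(rev[:3]); rev = rev[3:]' loop of Source B (rev[:3] = take 3, rev[3:] = drop 3)
def chunks3 : List Char → List (List Char)
  | [] => []
  | a :: rest => ((a :: rest).take 3) :: chunks3 (rest.drop 2)
termination_by l => l.length
decreasing_by simp only [List.length_cons, List.length_drop]; omega

-- ','.join(chunks): separator only between elements
def joinComma : List (List Char) → List Char
  | [] => []
  | [x] => x
  | x :: y :: xs => x ++ ',' :: joinComma (y :: xs)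

def add_phay_alt (s : String) : String :=
  String.ofList (joinComma (chunks3 s.toList.reverse))

-- ===== PRECONDITION & SPEC =====
def Spec_add_phay (s : String) (out : String) : Prop := out = add_phay_alt s
instance (s : String) (out : String) : Decidable (Spec_add_phay s out) := by unfold Spec_add_phay; infer_instance

-- ===== CLAIM (what is proved, stated in full; the proofs are below) =====
def Claim_equal_add_phay : Prop := ∀ (s : String), Dom_add_phay s → Spec_add_phay s (add_phay s)

-- ===== LEMMAS AND PROOFS =====

-- A's loop body, as a function of the character it reads
def stepA (st : Int × List Char) (c : Char) : Int × List Char :=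
  let tmp := st.1
  let result := st.2
  let result := if tmp == 3 then result ++ [','] else result
  let tmp := if tmp == 3 then (0 : Int) else tmp
  (tmp + 1, result ++ [c])

-- the countdown-index map materialises the reversed character list
theorem map_idx_reverse (cs : List Char) :
    (PySem.List.pyRange ((cs.length : Int) - 1) (-1) (-1)).map
      (fun i => (PySem.List.pyGet? cs i).getD ' ') = cs.reverse := by
  induction cs using List.reverseRecOn with
  | nil =>
      rw [PySem.List.pyRange_neg_one_eq_nil (by norm_num)]
      simp
  | append_singleton ys a ih =>
      have hlen : ((ys ++ [a]).length : Int) - 1 = (ys.length : Int) := by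
        simp
      rw [hlen, PySem.List.pyRange_neg_one_cons (by omega)]
      simp only [List.map_cons]
      have h1 : (PySem.List.pyGet? (ys ++ [a]) (ys.length : Int)).getD ' ' = a := by
        rw [PySem.List.pyGet?_append_length]; rfl
      have h2 : (PySem.List.pyRange ((ys.length : Int) - 1) (-1) (-1)).map
          (fun i => (PySem.List.pyGet? (ys ++ [a]) i).getD ' ')
          = (PySem.List.pyRange ((ys.length : Int) - 1) (-1) (-1)).map
          (fun i => (PySem.List.pyGet? ys i).getD ' ') := by
        apply List.map_congr_left
        intro i hi
        have hmem := (PySem.List.mem_pyRange_neg_one).1 hi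
        have h0 : 0 ≤ i := by omega
        have hlt : i < (ys.length : Int) := by omega
        rw [PySem.List.pyGet?_of_nonneg _ h0, PySem.List.pyGet?_of_nonneg _ h0]
        rw [List.getElem?_append_left (by omega)]
      rw [h1, h2, ih]
      simp

-- the fold with counter 0 produces the comma-joined 3-chunks, for any accumulated prefix
theorem fold_stepA_join :
    ∀ (n : Nat) (l : List Char), l.length ≤ n → ∀ res : List Char,
      (l.foldl stepA (0, res)).2 = res ++ joinComma (chunks3 l) := by
  intro n
  induction n with
  | zero =>
      intro l hl res
      have : l = [] := List.eq_nil_of_length_eq_zero (by omega)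
      subst this
      simp [chunks3, joinComma]
  | succ n ih =>
      intro l hl res
      match l with
      | [] => simp [chunks3, joinComma]
      | [a] => simp [stepA, chunks3, joinComma]
      | [a, b] => simp [stepA, chunks3, joinComma]
      | [a, b, c] => simp [stepA, chunks3, joinComma]
      | a :: b :: c :: d :: rs =>
        have hfold : ((a :: b :: c :: d :: rs).foldl stepA (0, res)).2
            = ((d :: rs).foldl stepA (0, res ++ [a, b, c] ++ [','])).2 := by
          simp [stepA, List.foldl_cons]
        have hlen : (d :: rs).length ≤ n := by
          simp at hl ⊢; omega
        rw [hfold, ih _ hlen]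
        have hch : chunks3 (a :: b :: c :: d :: rs) = [a, b, c] :: chunks3 (d :: rs) := by
          rw [chunks3]; simp
        have hne : chunks3 (d :: rs) ≠ [] := by
          rw [chunks3]; simp
        rw [hch]
        match hx : chunks3 (d :: rs) with
        | [] => exact absurd hx hne
        | y :: ys => simp [joinComma]

-- ===== VERDICT (by name: the statement is the Claim_ definition above) =====
theorem add_phay_spec : Claim_equal_add_phay := by
  intro s _
  unfold Spec_add_phay add_phay add_phay_alt
  have hbody : (PySem.List.pyRange ((s.toList.length : Int) - 1) (-1) (-1)).foldl
      (fun (st : Int × List Char) i =>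
        let tmp := st.1
        let result := st.2
        let result := if tmp == 3 then result ++ [','] else result
        let tmp := if tmp == 3 then (0 : Int) else tmp
        (tmp + 1, result ++ [(PySem.List.pyGet? s.toList i).getD ' ']))
      ((0 : Int), ([] : List Char))
      = ((PySem.List.pyRange ((s.toList.length : Int) - 1) (-1) (-1)).map
          (fun i => (PySem.List.pyGet? s.toList i).getD ' ')).foldl stepA (0, []) := by
    rw [List.foldl_map]
    rfl
  simp only [hbody, map_idx_reverse]
  rw [fold_stepA_join s.toList.reverse.length _ (le_refl _) []]
  simp
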